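-- pv_equiv track=rewrite | github.com/xinkaichen97/Enhanced-PCFG-Password-Prediction | GeneratePwd.py | fill_init_values
-- ===== SOURCE A (Python) =====
-- def split_patterns(patternStr):
--     patternList = []
--     start, end = 0, 0
--     for i in range(1, len(patternStr)):
--         if patternStr[i] in ['D','F','C','L','S','P']:
--             end = i
--             patternList.append(patternStr[start:end])
--             start = i
--     patternList.append(patternStr[end:])
--     return patternList
--
-- def fill_init_values(baseStr, freqDict):
--     returnStr = ""
--     baseStrList = split_patterns(baseStr)
--     for bStr in baseStrList:
--         if bStr[0] in ['D','L','S']: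
--             returnStr += freqDict[bStr][0][0]
--         else:
--             returnStr += bStr
--     return returnStr
-- ===== SOURCE B (Python) =====
-- # Single fused pass over baseStr: no split_patterns helper, no intermediate
-- # segment list; maintains the current segment and flushes it at each boundary.
-- def _render(seg, freqDict):
--     return freqDict[seg][0][0] if seg[0] in ('D', 'L', 'S') else seg
--
-- def fill_init_values(baseStr, freqDict):
--     out = []
--     cur = []
--     first = True
--     for ch in baseStr:
--         if not first and ch in ('D', 'F', 'C', 'L', 'S', 'P'):
--             out.append(_render(''.join(cur), freqDict))
--             cur = []
--         cur.append(ch)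
--         first = False
--     out.append(_render(''.join(cur), freqDict))
--     return ''.join(out)
-- ===== Notes on version B (the rewrite author's own statement) =====
-- stated objective: simpler
-- what changed: B fuses A's two phases (index-based split_patterns building a segment list via slicing, then a second loop rendering each segment) into one character-level pass that maintains the current segment and flushes it at each boundary, with no index arithmetic, no slicing and no intermediate segment list.
import Mathlib
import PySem

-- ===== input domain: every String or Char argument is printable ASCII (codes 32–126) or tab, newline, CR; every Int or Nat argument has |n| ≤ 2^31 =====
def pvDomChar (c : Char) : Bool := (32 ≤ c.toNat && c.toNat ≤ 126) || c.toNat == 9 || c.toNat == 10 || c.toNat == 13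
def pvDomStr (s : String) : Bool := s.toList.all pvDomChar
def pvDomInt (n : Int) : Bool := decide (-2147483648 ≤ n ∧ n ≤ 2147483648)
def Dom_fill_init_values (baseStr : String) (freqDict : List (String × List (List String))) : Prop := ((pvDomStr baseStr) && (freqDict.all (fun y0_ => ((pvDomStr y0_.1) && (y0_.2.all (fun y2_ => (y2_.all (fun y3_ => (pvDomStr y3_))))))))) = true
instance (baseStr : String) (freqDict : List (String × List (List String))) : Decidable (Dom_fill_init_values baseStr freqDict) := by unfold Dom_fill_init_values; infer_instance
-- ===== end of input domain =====

-- B fuses A's two phases (split into a segment list, then render each segment)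
-- into one character pass maintaining the current segment; same output.

-- ===== PORT A =====
-- literal transliteration of split_patterns: indexed loop over range(1, len),
-- state (patternList, start, end), Python slicing via PySem.List.slice.
def split_patterns (patternStr : List Char) : List (List Char) :=
  let st := (PySem.List.pyRange 1 (patternStr.length : Int) 1).foldl
    (fun (acc : List (List Char) × Int × Int) i =>
      if (PySem.List.pyGetD patternStr i ' ') ∈ (['D','F','C','L','S','P'] : List Char) then
        (acc.1 ++ [PySem.List.slice patternStr (some acc.2.1) (some i)], i, i)
      else acc)
    ([], 0, 0)
  st.1 ++ [PySem.List.slice patternStr (some st.2.2) none]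

-- fill_init_values: loop over the segment list, concatenating either the
-- dict lookup freqDict[bStr][0][0] (indexing via pyGetD; Pre_ keeps it in range)
-- or the segment itself.  Python dict lookup on the assoc list = first match.
def fill_init_values (baseStr : String) (freqDict : List (String × List (List String))) : String :=
  let baseStrList := split_patterns baseStr.toList
  String.mk (baseStrList.foldl
    (fun (returnStr : List Char) bStr =>
      if (PySem.List.pyGetD bStr 0 ' ') ∈ (['D','L','S'] : List Char) then
        returnStr ++ (PySem.List.pyGetD
          (PySem.List.pyGetD
            (((freqDict.find? (fun kv => kv.1 == String.mk bStr)).map (·.2)).getD []) 0 [])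
          0 "").toList
      else returnStr ++ bStr)
    [])

-- ===== PORT B =====
-- _render(seg, freqDict)
def pvRender (freqDict : List (String × List (List String))) (seg : List Char) : List Char :=
  if (PySem.List.pyGetD seg 0 ' ') ∈ (['D','L','S'] : List Char) then
    (PySem.List.pyGetD
      (PySem.List.pyGetD
        (((freqDict.find? (fun kv => kv.1 == String.mk seg)).map (·.2)).getD []) 0 [])
      0 "").toList
  else seg

-- one pass over the characters; state (out, cur, first); flush at boundaries.
def fill_init_values_alt (baseStr : String) (freqDict : List (String × List (List String))) : String :=
  let st := baseStr.toList.foldl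
    (fun (acc : List (List Char) × List Char × Bool) ch =>
      if acc.2.2 = false ∧ ch ∈ (['D','F','C','L','S','P'] : List Char) then
        (acc.1 ++ [pvRender freqDict acc.2.1], [ch], false)
      else (acc.1, acc.2.1 ++ [ch], false))
    ([], [], true)
  String.mk ((st.1 ++ [pvRender freqDict st.2.1]).flatten)

-- ===== PRECONDITION & SPEC =====
-- reference segmentation used only to STATE the precondition (neither port uses it)
def pvSegRec (cur : List Char) : List Char → List (List Char)
  | [] => [cur]
  | c :: rest =>
    if c ∈ (['D','F','C','L','S','P'] : List Char) then cur :: pvSegRec [c] rest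
    else pvSegRec (cur ++ [c]) rest

def pvSegments (p : List Char) : List (List Char) :=
  match p with
  | [] => [[]]
  | c :: rest => pvSegRec [c] rest

def pvKeyOK (freqDict : List (String × List (List String))) (seg : List Char) : Bool :=
  match freqDict.find? (fun kv => kv.1 == String.mk seg) with
  | some kv => !kv.2.isEmpty && !(kv.2.headD []).isEmpty
  | none => false

-- Pre_ = exactly where the Python A returns: baseStr nonempty (A indexes seg[0]
-- of the final segment, IndexError on ""), and every D/L/S-headed segment is a
-- key of freqDict whose value has a nonempty first entry (else KeyError/IndexError).
def Pre_fill_init_values (baseStr : String) (freqDict : List (String × List (List String))) : Prop :=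
  baseStr.toList ≠ [] ∧
  ∀ seg ∈ pvSegments baseStr.toList,
    (seg.headD ' ') ∈ (['D','L','S'] : List Char) → pvKeyOK freqDict seg = true

instance (baseStr : String) (freqDict : List (String × List (List String))) : Decidable (Pre_fill_init_values baseStr freqDict) := by
  unfold Pre_fill_init_values; infer_instance

def pvWitness_fill_init_values : String × (List (String × List (List String))) :=
  ("D1", [("D1", [["777"]])])

def Spec_fill_init_values (baseStr : String) (freqDict : List (String × List (List String))) (out : String) : Prop := out = fill_init_values_alt baseStr freqDict
instance (baseStr : String) (freqDict : List (String × List (List String))) (out : String) : Decidable (Spec_fill_init_values baseStr freqDict out) := by unfold Spec_fill_init_values; infer_instance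

-- ===== CLAIM (what is proved, stated in full; the proofs are below) =====
def Claim_equal_fill_init_values : Prop := ∀ (baseStr : String) (freqDict : List (String × List (List String))), Dom_fill_init_values baseStr freqDict → Pre_fill_init_values baseStr freqDict → Spec_fill_init_values baseStr freqDict (fill_init_values baseStr freqDict)

-- ===== LEMMAS AND PROOFS =====

-- B's loop, started after the first character, flushes exactly pvSegRec's segments.
theorem altLoop_eq_segRec (freqDict : List (String × List (List String))) :
    ∀ (rest : List Char) (out : List (List Char)) (cur : List Char),
    (rest.foldl
      (fun (acc : List (List Char) × List Char × Bool) ch =>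
        if acc.2.2 = false ∧ ch ∈ (['D','F','C','L','S','P'] : List Char) then
          (acc.1 ++ [pvRender freqDict acc.2.1], [ch], false)
        else (acc.1, acc.2.1 ++ [ch], false))
      (out, cur, false)).1
    ++ [pvRender freqDict
        (rest.foldl
          (fun (acc : List (List Char) × List Char × Bool) ch =>
            if acc.2.2 = false ∧ ch ∈ (['D','F','C','L','S','P'] : List Char) then
              (acc.1 ++ [pvRender freqDict acc.2.1], [ch], false)
            else (acc.1, acc.2.1 ++ [ch], false))
          (out, cur, false)).2.1]
    = out ++ (pvSegRec cur rest).map (pvRender freqDict) := by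
  intro rest
  induction rest with
  | nil => intro out cur; simp [pvSegRec]
  | cons c rest ih =>
    intro out cur
    by_cases hc : c ∈ (['D','F','C','L','S','P'] : List Char)
    · have h1 : ((c :: rest).foldl
          (fun (acc : List (List Char) × List Char × Bool) ch =>
            if acc.2.2 = false ∧ ch ∈ (['D','F','C','L','S','P'] : List Char) then
              (acc.1 ++ [pvRender freqDict acc.2.1], [ch], false)
            else (acc.1, acc.2.1 ++ [ch], false))
          (out, cur, false))
          = (rest.foldl
          (fun (acc : List (List Char) × List Char × Bool) ch =>
            if acc.2.2 = false ∧ ch ∈ (['D','F','C','L','S','P'] : List Char) then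
              (acc.1 ++ [pvRender freqDict acc.2.1], [ch], false)
            else (acc.1, acc.2.1 ++ [ch], false))
          (out ++ [pvRender freqDict cur], [c], false)) := by
        simp [List.foldl_cons]
        rw [if_pos (by simpa using hc)]
      rw [h1, ih]
      simp [pvSegRec, hc]
    · have h1 : ((c :: rest).foldl
          (fun (acc : List (List Char) × List Char × Bool) ch =>
            if acc.2.2 = false ∧ ch ∈ (['D','F','C','L','S','P'] : List Char) then
              (acc.1 ++ [pvRender freqDict acc.2.1], [ch], false)
            else (acc.1, acc.2.1 ++ [ch], false))
          (out, cur, false))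
          = (rest.foldl
          (fun (acc : List (List Char) × List Char × Bool) ch =>
            if acc.2.2 = false ∧ ch ∈ (['D','F','C','L','S','P'] : List Char) then
              (acc.1 ++ [pvRender freqDict acc.2.1], [ch], false)
            else (acc.1, acc.2.1 ++ [ch], false))
          (out, cur ++ [c], false)) := by
        simp [List.foldl_cons]
        rw [if_neg (by simpa using hc)]
      rw [h1, ih]
      simp [pvSegRec, hc]

theorem alt_eq_segments (baseStr : String) (freqDict : List (String × List (List String))) :
    fill_init_values_alt baseStr freqDict
      = String.mk (((pvSegments baseStr.toList).map (pvRender freqDict)).flatten) := by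
  unfold fill_init_values_alt
  cases h : baseStr.toList with
  | nil => rfl
  | cons c rest =>
    simp only [List.foldl_cons]
    rw [if_neg (by simp)]
    simp only [List.nil_append]
    rw [altLoop_eq_segRec freqDict rest [] [c]]
    simp [pvSegments]

-- pushing ++ through a fold: rendering fold = flatten of map
theorem foldl_append_render (g : List Char → List Char) :
    ∀ (l : List (List Char)) (acc : List Char),
    l.foldl (fun r b => r ++ g b) acc = acc ++ (l.map g).flatten := by
  intro l
  induction l with
  | nil => simp
  | cons b l ih => intro acc; simp [List.foldl_cons, ih (acc ++ g b)]

-- the invariant of A's indexed split loop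
theorem splitLoop_inv (p : List Char) (k : Nat) (h1 : 1 ≤ k) (hk : k ≤ p.length) :
    ∃ (pl : List (List Char)) (s : Nat),
      (PySem.List.pyRange 1 (k : Int) 1).foldl
        (fun (acc : List (List Char) × Int × Int) i =>
          if (PySem.List.pyGetD p i ' ') ∈ (['D','F','C','L','S','P'] : List Char) then
            (acc.1 ++ [PySem.List.slice p (some acc.2.1) (some i)], i, i)
          else acc)
        ([], 0, 0) = (pl, (s : Int), (s : Int))
      ∧ s < k
      ∧ pvSegments p = pl ++ (pvSegRec ((p.drop s).take (k - s)) (p.drop k)) := by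
  induction k with
  | zero => omega
  | succ k ih =>
    by_cases hk1 : k = 0
    · subst hk1
      refine ⟨[], 0, ?_, by omega, ?_⟩
      · simp [PySem.List.pyRange_one_eq_nil]
      · cases hp : p with
        | nil => rw [hp] at hk; simp at hk
        | cons c rest => simp [pvSegments]
    · obtain ⟨pl, s, hfold, hs, hseg⟩ := ih (by omega) (by omega)
      have hrange : PySem.List.pyRange 1 ((k : Int) + 1) 1
          = PySem.List.pyRange 1 (k : Int) 1 ++ [(k : Int)] :=
        PySem.List.pyRange_one_succ_right (by exact_mod_cast Nat.one_le_iff_ne_zero.mpr hk1)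
      have hklen : k < p.length := by omega
      have hget : PySem.List.pyGetD p (k : Int) ' ' = p[k] :=
        by simp [List.getD_eq_getElem?_getD, List.getElem?_eq_getElem hklen]
      have hdrop : p.drop k = p[k] :: p.drop (k + 1) :=
        List.drop_eq_getElem_cons hklen
      push_cast
      rw [hrange, List.foldl_append, hfold]
      by_cases hc : p[k] ∈ (['D','F','C','L','S','P'] : List Char)
      · refine ⟨pl ++ [PySem.List.slice p (some (s : Int)) (some (k : Int))], k, ?_, by omega, ?_⟩
        · simp only [List.foldl_cons, List.foldl_nil, hget]
          rw [if_pos hc]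
        · have hslice : PySem.List.slice p (some (s : Int)) (some (k : Int))
              = (p.drop s).take (k - s) := PySem.List.slice_natCast p s k
          rw [hseg, hdrop, hslice]
          simp only [pvSegRec, if_pos hc]
          rw [show k + 1 - k = 1 by omega]
          rw [show List.take 1 (p[k] :: List.drop (k+1) p) = [p[k]] from rfl]
          simp
      · refine ⟨pl, s, ?_, by omega, ?_⟩
        · simp only [List.foldl_cons, List.foldl_nil, hget]
          rw [if_neg hc]
        · rw [hseg, hdrop]
          simp only [pvSegRec, if_neg hc]
          congr 1
          have hlt : k - s < (p.drop s).length := by simp [List.length_drop]; omega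
          have hge : (p.drop s)[k - s] = p[k] := by
            have h3 : (p.drop s)[k - s]? = p[k]? := by
              rw [List.getElem?_drop]
              congr 1
              omega
            rw [List.getElem?_eq_getElem hlt, List.getElem?_eq_getElem hklen] at h3
            exact Option.some.inj h3
          have h2 : (p.drop s).take (k - s) ++ [p[k]] = (p.drop s).take (k - s + 1) := by
            rw [List.take_succ, List.getElem?_eq_getElem hlt, hge]
            simp
          rw [show k + 1 - s = k - s + 1 by omega, ← h2]

-- A's split_patterns computes the reference segmentation
theorem split_eq_segments (p : List Char) : split_patterns p = pvSegments p := by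
  unfold split_patterns
  by_cases hp : p.length = 0
  · have : p = [] := List.length_eq_zero_iff.mp hp
    subst this
    simp [PySem.List.pyRange_one_eq_nil, PySem.List.slice, pvSegments]
  · obtain ⟨pl, s, hfold, hs, hseg⟩ := splitLoop_inv p p.length (by omega) (le_refl _)
    simp only [hfold]
    have hfrom : PySem.List.slice p (some (s : Int)) none = p.drop s :=
      PySem.List.slice_from_natCast p s
    have htake : (p.drop s).take (p.length - s) = p.drop s := by
      apply List.take_of_length_le; simp [List.length_drop]
    rw [hfrom, hseg, htake]
    simp [pvSegRec]

-- A's rendering fold, pointwise, is ++ pvRender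
theorem fill_eq_segments (baseStr : String) (freqDict : List (String × List (List String))) :
    fill_init_values baseStr freqDict
      = String.mk (((pvSegments baseStr.toList).map (pvRender freqDict)).flatten) := by
  unfold fill_init_values
  rw [split_eq_segments]
  have hfun : (fun (returnStr : List Char) (bStr : List Char) =>
      if (PySem.List.pyGetD bStr 0 ' ') ∈ (['D','L','S'] : List Char) then
        returnStr ++ (PySem.List.pyGetD
          (PySem.List.pyGetD
            (((freqDict.find? (fun kv => kv.1 == String.mk bStr)).map (·.2)).getD []) 0 [])
          0 "").toList
      else returnStr ++ bStr)
      = fun (r : List Char) (b : List Char) => r ++ pvRender freqDict b := by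
    funext r b
    unfold pvRender
    split_ifs <;> rfl
  simp only [hfun, foldl_append_render (pvRender freqDict)]
  simp

-- ===== VERDICT (by name: the statement is the Claim_ definition above) =====
theorem fill_init_values_spec : Claim_equal_fill_init_values := by
  intro baseStr freqDict _ _
  unfold Spec_fill_init_values
  rw [fill_eq_segments, alt_eq_segments]
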